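-- pv_equiv track=rewrite | github.com/TR-development-team/TR_add_country_tags | color.py | joint_country
-- ===== SOURCE A (Python) =====
-- def joint_country(l):
-- 	t1 = []
-- 	t2 = []
-- 	i = 1
-- 	for x in l:
-- 		if(i % 4 == 1 ) or (i % 4 == 2) or (i % 4 == 3):
-- 			t1.append(l[i - 1])
-- 		elif(i % 4 == 0):
-- 			t1.append(l[i - 1])
-- 			t2.append("".join(t1))
-- 			t1 = []
-- 		i += 1
-- 	return t2
-- ===== SOURCE B (Python) =====
-- def joint_country(l):
-- 	return ["".join(g) for g in zip(*[iter(l)] * 4)]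
-- ===== Notes on version B (the rewrite author's own statement) =====
-- stated objective: idiomatic
-- what changed: Replaced the per-element counter with modular flush logic by the standard grouper idiom zip(*[iter(l)]*4), joining each 4-tuple directly (trailing remainder dropped by zip exactly as A drops its unflushed buffer).
import Mathlib
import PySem

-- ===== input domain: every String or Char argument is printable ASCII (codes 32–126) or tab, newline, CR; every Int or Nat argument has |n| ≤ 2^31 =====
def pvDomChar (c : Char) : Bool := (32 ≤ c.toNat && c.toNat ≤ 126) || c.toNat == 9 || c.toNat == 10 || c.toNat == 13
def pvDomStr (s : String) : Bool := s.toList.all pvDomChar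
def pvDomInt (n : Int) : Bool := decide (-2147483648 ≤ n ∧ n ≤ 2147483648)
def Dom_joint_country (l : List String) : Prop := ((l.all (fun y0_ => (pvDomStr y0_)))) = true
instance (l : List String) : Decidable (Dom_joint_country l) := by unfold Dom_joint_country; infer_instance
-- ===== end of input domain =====

-- B replaces A's per-element counter/modular-flush loop by the grouper idiom (4-at-a-time chunking); idiomatic, same cost.


-- ===== PORT A =====
-- loop body of A; l[i-1] is ported with pyGetD (i-1 is always in range: 1 ≤ i ≤ len l inside the loop, so Python never raises here)
def jcStep (l : List String) (st : List String × List String × Int) (_x : String) : List String × List String × Int :=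
  match st with
  | (t1, t2, i) =>
    if PySem.Int.mod i 4 = 1 ∨ PySem.Int.mod i 4 = 2 ∨ PySem.Int.mod i 4 = 3 then
      (t1 ++ [PySem.List.pyGetD l (i - 1) ""], t2, i + 1)
    else if PySem.Int.mod i 4 = 0 then
      ([], t2 ++ [PySem.Str.join "" (t1 ++ [PySem.List.pyGetD l (i - 1) ""])], i + 1)
    else
      (t1, t2, i + 1)

def joint_country (l : List String) : List String :=
  (l.foldl (jcStep l) ([], [], 1)).2.1

-- ===== PORT B =====
-- zip(*[iter(l)]*4) groups l into 4-tuples, truncating the remainder; each tuple is joined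
def joint_country_alt : List String → List String
  | a :: b :: c :: d :: rest => PySem.Str.join "" [a, b, c, d] :: joint_country_alt rest
  | _ => []

-- ===== PRECONDITION & SPEC =====
def Spec_joint_country (l : List String) (out : List String) : Prop := out = joint_country_alt l
instance (l : List String) (out : List String) : Decidable (Spec_joint_country l out) := by unfold Spec_joint_country; infer_instance

-- ===== CLAIM (what is proved, stated in full; the proofs are below) =====
def Claim_equal_joint_country : Prop := ∀ (l : List String), Dom_joint_country l → Spec_joint_country l (joint_country l)

-- ===== LEMMAS AND PROOFS =====

-- A's fold, started at position k (4 ∣ k) with an empty buffer, appends to t2 exactly B's chunking of the suffix.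
theorem jc_aux (rest : List String) (l : List String) (t2 : List String) (k : Nat)
    (hd : l.drop k = rest) (hk : k % 4 = 0) :
    (rest.foldl (jcStep l) ([], t2, (k : Int) + 1)).2.1 = t2 ++ joint_country_alt rest := by
  have hget : ∀ (j : Nat) (x : String), rest[j]? = some x →
      PySem.List.pyGetD l ((k : Int) + (j : Int)) "" = x := by
    intro j x hx
    have hcast : ((k : Int) + (j : Int)) = (((k + j : Nat) : Int)) := by push_cast; ring
    rw [hcast, PySem.List.pyGetD_natCast]
    have : l[k + j]? = some x := by rw [← List.getElem?_drop, hd]; exact hx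
    simp [List.getD, this]
  have hm : ∀ (r : Nat), PySem.Int.mod ((k : Int) + (r : Int)) 4 = ((r % 4 : Nat) : Int) := by
    intro r
    rw [PySem.Int.mod_eq_emod_of_pos (by norm_num)]
    omega
  match rest with
  | [] => simp [joint_country_alt]
  | [a] =>
    have h1 := hm 1
    simp only [List.foldl_cons, List.foldl_nil, jcStep]
    norm_num at h1
    simp [h1, joint_country_alt]
  | [a, b] =>
    have h1 := hm 1; have h2 := hm 2
    norm_num at h1 h2
    simp only [List.foldl_cons, List.foldl_nil, jcStep]
    simp [h1, show (k:Int) + 1 + 1 = (k:Int) + 2 by ring, h2, joint_country_alt]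
  | [a, b, c] =>
    have h1 := hm 1; have h2 := hm 2; have h3 := hm 3
    norm_num at h1 h2 h3
    simp only [List.foldl_cons, List.foldl_nil, jcStep]
    simp [h1, show (k:Int) + 1 + 1 = (k:Int) + 2 by ring, h2,
      show (k:Int) + 2 + 1 = (k:Int) + 3 by ring, h3, joint_country_alt]
  | a :: b :: c :: d :: rest' =>
    have hmod : ∀ (r : Nat), PySem.Int.mod ((k : Int) + (r : Int)) 4 = ((r % 4 : Nat) : Int) := hm
    have h1 : PySem.Int.mod ((k : Int) + 1) 4 = 1 := by
      rw [PySem.Int.mod_eq_emod_of_pos (by norm_num)]; omega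
    have h2 : PySem.Int.mod ((k : Int) + 2) 4 = 2 := by
      rw [PySem.Int.mod_eq_emod_of_pos (by norm_num)]; omega
    have h3 : PySem.Int.mod ((k : Int) + 3) 4 = 3 := by
      rw [PySem.Int.mod_eq_emod_of_pos (by norm_num)]; omega
    have h4 : PySem.Int.mod ((k : Int) + 4) 4 = 0 := by
      rw [PySem.Int.mod_eq_emod_of_pos (by norm_num)]; omega
    have hno : ¬(PySem.Int.mod ((k : Int) + 4) 4 = 1 ∨ PySem.Int.mod ((k : Int) + 4) 4 = 2 ∨ PySem.Int.mod ((k : Int) + 4) 4 = 3) := by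
      rintro (h | h | h) <;> rw [h4] at h <;> simp at h
    have hj : ∀ (j : Nat) (x : String), (a :: b :: c :: d :: rest')[j]? = some x →
        PySem.List.pyGetD l (((k + j : Nat) : Int)) "" = x := by
      intro j x hx
      have := hget j x hx
      rwa [show ((k : Int) + (j : Int)) = (((k + j : Nat) : Int)) by push_cast; ring] at this
    have ga : PySem.List.pyGetD l ((k : Int)) "" = a := by
      simpa using hj 0 a (by simp)
    have gb : PySem.List.pyGetD l ((k : Int) + 1) "" = b := by
      have := hj 1 b (by simp); rwa [show (((k + 1 : Nat) : Int)) = (k : Int) + 1 by push_cast; ring] at this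
    have gc : PySem.List.pyGetD l ((k : Int) + 2) "" = c := by
      have := hj 2 c (by simp); rwa [show (((k + 2 : Nat) : Int)) = (k : Int) + 2 by push_cast; ring] at this
    have gd : PySem.List.pyGetD l ((k : Int) + 3) "" = d := by
      have := hj 3 d (by simp); rwa [show (((k + 3 : Nat) : Int)) = (k : Int) + 3 by push_cast; ring] at this
    have hd' : l.drop (k + 4) = rest' := by
      have h := congrArg (List.drop 4) hd
      simpa [List.drop_drop, Nat.add_comm] using h
    have ih := jc_aux rest' l (t2 ++ [PySem.Str.join "" [a, b, c, d]]) (k + 4) hd' (by omega)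
    have s1 : jcStep l ([], t2, (k : Int) + 1) a = ([a], t2, (k : Int) + 2) := by
      simp only [jcStep]
      rw [if_pos (Or.inl h1), show (k : Int) + 1 - 1 = (k : Int) by ring, ga]
      simp [Prod.ext_iff]; omega
    have s2 : jcStep l ([a], t2, (k : Int) + 2) b = ([a, b], t2, (k : Int) + 3) := by
      simp only [jcStep]
      rw [if_pos (Or.inr (Or.inl h2)), show (k : Int) + 2 - 1 = (k : Int) + 1 by ring, gb]
      simp [Prod.ext_iff]; omega
    have s3 : jcStep l ([a, b], t2, (k : Int) + 3) c = ([a, b, c], t2, (k : Int) + 4) := by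
      simp only [jcStep]
      rw [if_pos (Or.inr (Or.inr h3)), show (k : Int) + 3 - 1 = (k : Int) + 2 by ring, gc]
      simp [Prod.ext_iff]; omega
    have s4 : jcStep l ([a, b, c], t2, (k : Int) + 4) d =
        ([], t2 ++ [PySem.Str.join "" [a, b, c, d]], (k : Int) + 5) := by
      simp only [jcStep]
      rw [if_neg hno, if_pos h4, show (k : Int) + 4 - 1 = (k : Int) + 3 by ring, gd]
      simp [Prod.ext_iff]; omega
    rw [List.foldl_cons, s1, List.foldl_cons, s2, List.foldl_cons, s3, List.foldl_cons, s4,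
      show (k : Int) + 5 = ((k + 4 : Nat) : Int) + 1 by push_cast; ring]
    simpa [joint_country_alt] using ih
termination_by rest.length

-- ===== VERDICT (by name: the statement is the Claim_ definition above) =====
theorem joint_country_spec : Claim_equal_joint_country := by
  intro l _
  unfold Spec_joint_country joint_country
  have := jc_aux l l [] 0 (by simp) (by decide)
  simpa using this
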